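-- pv_equiv track=rewrite | github.com/nomelancholy/problem_solving | 프로그래머스/unrated/181837. 커피 심부름/커피 심부름.py | solution
-- ===== SOURCE A (Python) =====
-- def solution(order):
--     answer = 0
--
--     for menu in order:
--         if 'cafelatte' in menu:
--             answer += 5000
--         else:
--             answer += 4500
--
--     return answer
-- ===== SOURCE B (Python) =====
-- def solution(order):
--     # divide and conquer: price a single order directly, otherwise split the
--     # list in half and add the totals of the two halves
--     if not order:
--         return 0
--     if len(order) == 1:
--         return 5000 if 'cafelatte' in order[0] else 4500
--     mid = len(order) // 2
--     return solution(order[:mid]) + solution(order[mid:])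
-- ===== Notes on version B (the rewrite author's own statement) =====
-- stated objective: alternative
-- what changed: Replaces A's single-pass branchy accumulator with a divide-and-conquer recursion: a one-element list is priced directly and a longer list is split in half and the two halves' totals are added.
import Mathlib
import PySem

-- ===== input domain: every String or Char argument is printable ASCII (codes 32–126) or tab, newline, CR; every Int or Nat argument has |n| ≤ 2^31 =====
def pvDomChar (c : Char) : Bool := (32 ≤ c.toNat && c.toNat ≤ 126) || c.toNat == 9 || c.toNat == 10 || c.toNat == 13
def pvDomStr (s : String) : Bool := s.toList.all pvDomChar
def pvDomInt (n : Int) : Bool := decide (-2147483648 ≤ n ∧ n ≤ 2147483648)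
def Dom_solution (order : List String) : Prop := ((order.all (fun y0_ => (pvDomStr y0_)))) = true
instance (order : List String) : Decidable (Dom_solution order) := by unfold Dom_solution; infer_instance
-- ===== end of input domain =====

-- B totals the bill by divide-and-conquer (split in half, add the halves) instead of A's single-pass accumulator loop.


-- ===== PORT A =====
def solution (order : List String) : Int :=
  order.foldl (fun answer menu =>
    if PySem.Str.isIn "cafelatte" menu then answer + 5000 else answer + 4500) 0

-- ===== PORT B =====
-- order[:mid] / order[mid:] with 0 ≤ mid ≤ len are exactly List.take / List.drop;
-- len(order)//2 on a nonnegative length is exactly Nat division by 2.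
def solution_alt (order : List String) : Int :=
  if h0 : order = [] then 0
  else if h1 : order.length = 1 then
    (if PySem.Str.isIn "cafelatte" (order.headI) then (5000 : Int) else 4500)
  else
    let mid := order.length / 2
    solution_alt (order.take mid) + solution_alt (order.drop mid)
termination_by order.length
decreasing_by
  · have hp : 0 < order.length := List.length_pos_of_ne_nil h0
    simp only [List.length_take]
    omega
  · have hp : 0 < order.length := List.length_pos_of_ne_nil h0
    simp only [List.length_drop]
    omega

-- ===== PRECONDITION & SPEC =====
def Spec_solution (order : List String) (out : Int) : Prop := out = solution_alt order
instance (order : List String) (out : Int) : Decidable (Spec_solution order out) := by unfold Spec_solution; infer_instance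

-- ===== CLAIM (what is proved, stated in full; the proofs are below) =====
def Claim_equal_solution : Prop := ∀ (order : List String), Dom_solution order → Spec_solution order (solution order)

-- ===== LEMMAS AND PROOFS =====
def price (m : String) : Int := if PySem.Str.isIn "cafelatte" m then 5000 else 4500

theorem solution_foldl (order : List String) (a : Int) :
    order.foldl (fun answer menu =>
      if PySem.Str.isIn "cafelatte" menu then answer + 5000 else answer + 4500) a
    = a + (order.map price).sum := by
  induction order generalizing a with
  | nil => simp
  | cons h t ih =>
    simp only [List.foldl_cons, ih, List.map_cons, List.sum_cons, price]
    split_ifs <;> ring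

theorem solution_eq_sum (order : List String) : solution order = (order.map price).sum := by
  unfold solution; rw [solution_foldl]; ring

theorem solution_alt_eq_sum (order : List String) : solution_alt order = (order.map price).sum := by
  induction hn : order.length using Nat.strong_induction_on generalizing order with
  | _ n ih =>
    rw [solution_alt]
    by_cases h0 : order = []
    · subst h0; simp
    · rw [dif_neg h0]
      by_cases h1 : order.length = 1
      · rw [dif_pos h1]
        cases order with
        | nil => simp at h0
        | cons m t =>
          cases t with
          | nil => simp [price, List.headI]
          | cons m2 t2 => simp at h1
      · rw [dif_neg h1]
        have hp : 0 < order.length := List.length_pos_of_ne_nil h0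
        show solution_alt (order.take (order.length / 2))
            + solution_alt (order.drop (order.length / 2)) = (order.map price).sum
        have htake := ih (order.take (order.length / 2)).length
          (by simp only [List.length_take]; omega) _ rfl
        have hdrop := ih (order.drop (order.length / 2)).length
          (by simp only [List.length_drop]; omega) _ rfl
        rw [htake, hdrop, ← List.sum_append, ← List.map_append, List.take_append_drop]

-- ===== VERDICT (by name: the statement is the Claim_ definition above) =====
theorem solution_spec : Claim_equal_solution := by
  intro order _
  unfold Spec_solution
  rw [solution_eq_sum, solution_alt_eq_sum]
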